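-- pv_equiv track=rewrite | github.com/pgalleguil/procasa-chatbot | api_leads_intelligence.py | determine_strongest_intent
-- ===== SOURCE A (Python) =====
-- def determine_strongest_intent(messages):
--     prioridades = [
--         "escalado_urgente",
--         "agendar_visita",
--         "contacto_directo",
--         "consultar_precio"
--     ]
--     intenciones = set()
--     for m in messages:
--         if m.get("intencion"):
--             intenciones.add(m.get("intencion"))
--
--     for p in prioridades:
--         if p in intenciones:
--             return p
--     return "consulta_general"
-- ===== SOURCE B (Python) =====
-- def determine_strongest_intent(messages):
--     prioridades = [
--         "escalado_urgente",
--         "agendar_visita",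
--         "contacto_directo",
--         "consultar_precio"
--     ]
--     rank = {p: i for i, p in enumerate(prioridades)}
--     best = None
--     for m in messages:
--         r = rank.get(m.get("intencion"))
--         if r is not None and (best is None or r < best):
--             best = r
--     return prioridades[best] if best is not None else "consulta_general"
-- ===== Notes on version B (the rewrite author's own statement) =====
-- stated objective: alternative
-- what changed: Replaces A's build-a-set-of-intents-then-scan-the-priority-list with a single pass over messages that tracks the minimum priority rank via a precomputed rank dict, indexing the priority list once at the end.
import Mathlib
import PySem

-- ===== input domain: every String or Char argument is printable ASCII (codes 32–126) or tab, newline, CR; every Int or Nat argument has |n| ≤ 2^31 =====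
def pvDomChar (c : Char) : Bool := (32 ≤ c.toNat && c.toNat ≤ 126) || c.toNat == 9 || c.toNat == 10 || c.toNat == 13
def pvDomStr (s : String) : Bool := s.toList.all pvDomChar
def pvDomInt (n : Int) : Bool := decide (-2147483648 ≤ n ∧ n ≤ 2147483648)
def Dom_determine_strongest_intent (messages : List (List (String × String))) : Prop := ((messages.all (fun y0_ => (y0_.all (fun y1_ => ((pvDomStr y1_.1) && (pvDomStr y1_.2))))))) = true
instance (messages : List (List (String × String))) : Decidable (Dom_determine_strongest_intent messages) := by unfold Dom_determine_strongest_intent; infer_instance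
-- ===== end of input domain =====

-- B replaces A's set-of-intents-then-priority-scan by one pass tracking the minimum priority rank (alternative decomposition, same cost).

-- ===== PORT A =====
-- body of A's first loop: add m.get("intencion") to the set when truthy
def pvStepA (s : PySem.Set String) (m : List (String × String)) : PySem.Set String :=
  match PySem.Dict.get? (PySem.Dict.mk m) "intencion" with
  | some v => if v ≠ "" then PySem.Set.add s v else s   -- 'if m.get("intencion"):' — truthy string
  | none => s

-- A's second loop: return the first priority present in the set, else the default
def pvPickIntent (intenciones : PySem.Set String) : List String → String
  | [] => "consulta_general"
  | p :: ps => if PySem.Set.contains intenciones p then p else pvPickIntent intenciones ps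

def determine_strongest_intent (messages : List (List (String × String))) : String :=
  let prioridades := ["escalado_urgente", "agendar_visita", "contacto_directo", "consultar_precio"]
  let intenciones : PySem.Set String := messages.foldl pvStepA PySem.Set.empty
  pvPickIntent intenciones prioridades

-- ===== PORT B =====
-- rank = {p: i for i, p in enumerate(prioridades)}
def pvRankDict : PySem.Dict String Int :=
  (PySem.List.enumerate ["escalado_urgente", "agendar_visita", "contacto_directo", "consultar_precio"] 0).foldl
    (fun d ip => d.insert ip.2 ip.1) PySem.Dict.empty

-- body of B's loop: keep the smaller rank, if any
def pvStepB (best : Option Int) (m : List (String × String)) : Option Int :=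
  match PySem.Dict.get? (PySem.Dict.mk m) "intencion" with
  | none => best                       -- rank.get(None) is None
  | some v =>
    match PySem.Dict.get? pvRankDict v with
    | none => best
    | some r =>
      match best with
      | none => some r
      | some b' => if r < b' then some r else best

def determine_strongest_intent_alt (messages : List (List (String × String))) : String :=
  let prioridades := ["escalado_urgente", "agendar_visita", "contacto_directo", "consultar_precio"]
  let best := messages.foldl pvStepB none
  match best with
  | some b' => PySem.List.pyGetD prioridades b' "consulta_general"   -- prioridades[best]; best always in range
  | none => "consulta_general"

-- ===== PRECONDITION & SPEC =====
def Spec_determine_strongest_intent (messages : List (List (String × String))) (out : String) : Prop := out = determine_strongest_intent_alt messages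
instance (messages : List (List (String × String))) (out : String) : Decidable (Spec_determine_strongest_intent messages out) := by unfold Spec_determine_strongest_intent; infer_instance

-- ===== CLAIM (what is proved, stated in full; the proofs are below) =====
def Claim_equal_determine_strongest_intent : Prop := ∀ (messages : List (List (String × String))), Dom_determine_strongest_intent messages → Spec_determine_strongest_intent messages (determine_strongest_intent messages)

-- ===== LEMMAS AND PROOFS =====

-- the minimum rank of a priority present in the set s — the value both loops track
def pvMinRank (s : PySem.Set String) : Option Int :=
  if PySem.Set.contains s "escalado_urgente" then some 0
  else if PySem.Set.contains s "agendar_visita" then some 1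
  else if PySem.Set.contains s "contacto_directo" then some 2
  else if PySem.Set.contains s "consultar_precio" then some 3
  else none

theorem pv_step (s : PySem.Set String) (m : List (String × String)) :
    pvMinRank (pvStepA s m) = pvStepB (pvMinRank s) m := by
  unfold pvStepA pvStepB
  cases hv : PySem.Dict.get? (PySem.Dict.mk m) "intencion" with
  | none => rfl
  | some v =>
    dsimp only
    by_cases h0 : v = "escalado_urgente"
    · subst h0
      have hrank : PySem.Dict.get? pvRankDict "escalado_urgente" = some 0 := by decide
      rw [hrank, if_pos (by decide : ("escalado_urgente" : String) ≠ "")]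
      simp only [pvMinRank, PySem.Set.contains_eq_listContains, List.contains_iff_mem, PySem.Set.mem_add]
      split_ifs <;> simp_all
    by_cases h1 : v = "agendar_visita"
    · subst h1
      have hrank : PySem.Dict.get? pvRankDict "agendar_visita" = some 1 := by decide
      rw [hrank, if_pos (by decide : ("agendar_visita" : String) ≠ "")]
      simp only [pvMinRank, PySem.Set.contains_eq_listContains, List.contains_iff_mem, PySem.Set.mem_add]
      split_ifs <;> simp_all
    by_cases h2 : v = "contacto_directo"
    · subst h2
      have hrank : PySem.Dict.get? pvRankDict "contacto_directo" = some 2 := by decide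
      rw [hrank, if_pos (by decide : ("contacto_directo" : String) ≠ "")]
      simp only [pvMinRank, PySem.Set.contains_eq_listContains, List.contains_iff_mem, PySem.Set.mem_add]
      split_ifs <;> simp_all
    by_cases h3 : v = "consultar_precio"
    · subst h3
      have hrank : PySem.Dict.get? pvRankDict "consultar_precio" = some 3 := by decide
      rw [hrank, if_pos (by decide : ("consultar_precio" : String) ≠ "")]
      simp only [pvMinRank, PySem.Set.contains_eq_listContains, List.contains_iff_mem, PySem.Set.mem_add]
      split_ifs <;> simp_all
    -- v is not a priority: the rank lookup misses, and adding v changes no priority membership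
    have hrank : PySem.Dict.get? pvRankDict v = none := by
      simp [pvRankDict, PySem.List.enumerate, PySem.Dict.get?_insert, h0, h1, h2, h3]
    rw [hrank]
    by_cases he : v = ""
    · subst he; simp
    · simp [he, pvMinRank, PySem.Set.contains_eq_listContains,
        PySem.Set.mem_add, Ne.symm h0, Ne.symm h1, Ne.symm h2, Ne.symm h3]

theorem pv_final (s : PySem.Set String) :
    pvPickIntent s ["escalado_urgente", "agendar_visita", "contacto_directo", "consultar_precio"]
    = (match pvMinRank s with
      | some b' => PySem.List.pyGetD ["escalado_urgente", "agendar_visita", "contacto_directo", "consultar_precio"] b' "consulta_general"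
      | none => "consulta_general") := by
  simp only [pvPickIntent, pvMinRank]
  split_ifs <;> rfl

theorem pv_fold (messages : List (List (String × String))) (s : PySem.Set String) (b : Option Int)
    (h : pvMinRank s = b) :
    pvMinRank (messages.foldl pvStepA s) = messages.foldl pvStepB b := by
  induction messages generalizing s b with
  | nil => simpa using h
  | cons m rest ih =>
    simp only [List.foldl_cons]
    apply ih
    rw [← h]
    exact pv_step s m

-- ===== VERDICT (by name: the statement is the Claim_ definition above) =====
theorem determine_strongest_intent_spec : Claim_equal_determine_strongest_intent := by
  intro messages _
  unfold Spec_determine_strongest_intent determine_strongest_intent determine_strongest_intent_alt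
  simp only []
  rw [pv_final, pv_fold messages PySem.Set.empty none rfl]
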